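-- pv_equiv track=rewrite | github.com/leobkmer/spp_dcj_experimental | scripts/spp_dcj.py | lca_treeedges_cp_tree
-- ===== SOURCE A (Python) =====
-- def trace_to_root(cp_tree,x):
--     trace = dict()
--     curr=x
--     while curr in cp_tree:
--         next, tree_edge = cp_tree[curr]
--         trace[curr]=(next,tree_edge)
--         curr = next
--     trace[curr]=(None,None)
--     return trace
--
-- def lca_treeedges_cp_tree(cp_tree,a,b):
--     #trace a to root
--     trace_a = trace_to_root(cp_tree,a)
--     curr = b
--     edges = []
--     while curr not in trace_a:
--         next,tree_edge = cp_tree[curr]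
--         edges.append(tree_edge)
--         curr = next
--     end = curr
--     curr = a
--     while curr!=end:
--         next,tree_edge = trace_a[curr]
--         edges.append(tree_edge)
--         curr=next
--     return edges
-- ===== SOURCE B (Python) =====
-- def _path_to_root(cp_tree, x):
--     nodes = [x]
--     edges = []
--     while x in cp_tree:
--         x, e = cp_tree[x]
--         nodes.append(x)
--         edges.append(e)
--     return nodes, edges
--
-- def lca_treeedges_cp_tree(cp_tree, a, b):
--     # Build both full paths to the root; find the LCA as the longest common
--     # suffix of the two node sequences (no membership set/dict needed).
--     nodes_a, edges_a = _path_to_root(cp_tree, a)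
--     nodes_b, edges_b = _path_to_root(cp_tree, b)
--     if nodes_a[-1] != nodes_b[-1]:
--         raise KeyError(nodes_b[-1])  # disconnected: as in the original walk
--     k = 0
--     for x, y in zip(reversed(nodes_a), reversed(nodes_b)):
--         if x != y:
--             break
--         k += 1
--     return edges_b[:len(nodes_b) - k] + edges_a[:len(nodes_a) - k]
-- ===== Notes on version B (the rewrite author's own statement) =====
-- stated objective: alternative
-- what changed: A traces only a to the root into a dict and walks b upward testing membership in that trace; B builds BOTH full root paths and finds the LCA with no membership structure at all, as the longest common suffix of the two node sequences (matching from the root end), returning the two edge-list slices b-side then a-side.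
import Mathlib
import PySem

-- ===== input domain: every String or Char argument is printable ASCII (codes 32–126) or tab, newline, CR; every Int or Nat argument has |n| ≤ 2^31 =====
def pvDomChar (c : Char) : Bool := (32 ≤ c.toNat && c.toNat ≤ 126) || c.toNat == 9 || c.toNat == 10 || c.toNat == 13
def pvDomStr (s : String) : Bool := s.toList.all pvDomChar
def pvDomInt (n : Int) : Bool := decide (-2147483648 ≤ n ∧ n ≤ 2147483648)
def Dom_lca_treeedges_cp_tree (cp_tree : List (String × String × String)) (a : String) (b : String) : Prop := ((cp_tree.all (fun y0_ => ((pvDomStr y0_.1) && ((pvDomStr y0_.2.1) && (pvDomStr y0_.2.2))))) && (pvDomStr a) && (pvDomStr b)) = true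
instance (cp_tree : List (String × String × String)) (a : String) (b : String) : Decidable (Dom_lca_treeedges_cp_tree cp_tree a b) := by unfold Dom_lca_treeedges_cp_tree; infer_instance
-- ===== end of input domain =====

-- B drops A's trace dict and membership walk entirely: it builds BOTH full root paths and
-- finds the LCA as the longest common suffix of the two node sequences, returning two slices.

-- first-match lookup in the association list representing the Python dict cp_tree
def pvLookup : List (String × String × String) → String → Option (String × String)
  | [], _ => none
  | (k, v) :: r, x => if k == x then some v else pvLookup r x

-- ===== PORT A =====
-- 'while curr in cp_tree: … ; trace[curr] = (None, None)' of trace_to_root, fueled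
def pvTraceLoop (t : List (String × String × String)) :
    Nat → String → PySem.Dict String (Option String × Option String) →
    PySem.Dict String (Option String × Option String)
  | 0, curr, tr => tr.insert curr (none, none)          -- fuel exhausted: unreachable under Pre_
  | f + 1, curr, tr =>
    match pvLookup t curr with
    | some (nxt, e) => pvTraceLoop t f nxt (tr.insert curr (some nxt, some e))
    | none => tr.insert curr (none, none)

-- 'while curr not in trace_a: …', fueled; KeyError/fuel exhaustion (outside Pre_) stop the walk
def pvWalkB (t : List (String × String × String))
    (tr : PySem.Dict String (Option String × Option String)) :
    Nat → String → List String → String × List String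
  | 0, curr, edges => (curr, edges)
  | f + 1, curr, edges =>
    if tr.contains curr then (curr, edges)
    else
      match pvLookup t curr with
      | some (nxt, e) => pvWalkB t tr f nxt (edges ++ [e])
      | none => (curr, edges)

-- 'while curr != end: …' following trace_a, fueled
def pvWalkA (tr : PySem.Dict String (Option String × Option String)) :
    Nat → String → String → List String → List String
  | 0, _, _, edges => edges
  | f + 1, curr, endN, edges =>
    if curr == endN then edges
    else
      match tr.get? curr with
      | some (some nxt, some e) => pvWalkA tr f nxt endN (edges ++ [e])
      | _ => edges

def lca_treeedges_cp_tree (cp_tree : List (String × String × String)) (a : String) (b : String) : List String :=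
  let trace_a := pvTraceLoop cp_tree (cp_tree.length + 1) a PySem.Dict.empty
  let r := pvWalkB cp_tree trace_a (cp_tree.length + 1) b []
  pvWalkA trace_a (cp_tree.length + 1) a r.1 r.2

-- ===== PORT B =====
-- _path_to_root: full path to the root as (node list, edge list), fueled
def pvPathUp (t : List (String × String × String)) : Nat → String → List String × List String
  | 0, x => ([x], [])
  | f + 1, x =>
    match pvLookup t x with
    | some (p, e) => let r := pvPathUp t f p; (x :: r.1, e :: r.2)
    | none => ([x], [])

-- the zip-and-break loop: length of the matching prefix of the zipped pair list
def pvMatchLen : List (String × String) → Nat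
  | [] => 0
  | (x, y) :: r => if x == y then pvMatchLen r + 1 else 0

def lca_treeedges_cp_tree_alt (cp_tree : List (String × String × String)) (a : String) (b : String) : List String :=
  let pa := pvPathUp cp_tree (cp_tree.length + 1) a
  let pb := pvPathUp cp_tree (cp_tree.length + 1) b
  if pa.1.getLast? = pb.1.getLast? then
    let k := pvMatchLen (List.zip pa.1.reverse pb.1.reverse)
    pb.2.take (pb.1.length - k) ++ pa.2.take (pa.1.length - k)
  else []   -- Python B raises KeyError here (different roots); these inputs are outside Pre_

-- ===== PRECONDITION & SPEC =====
-- one parent-step in cp_tree (roots are fixed)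
def pvUp (t : List (String × String × String)) (x : String) : String :=
  match List.lookup x t with
  | some v => v.1
  | none => x

def pvUpN (t : List (String × String × String)) : Nat → String → String
  | 0, x => x
  | n + 1, x => pvUpN t n (pvUp t x)

-- Pre_ excludes exactly the inputs where Python A does not return normally: a must reach a
-- root (no parent entry) — otherwise A's while-loops run forever on the cycle — and b's
-- upward chain must meet a's chain — otherwise A raises KeyError at the missing parent.
-- pvUpN n is the n-fold parent map of the input forest (a shape/reachability condition on
-- the input, not a copy of either port's loop: it collects no edges and builds no dict);
-- the bounds cp_tree.length suffice because a terminating chain never repeats a key.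
def Pre_lca_treeedges_cp_tree (cp_tree : List (String × String × String)) (a : String) (b : String) : Prop :=
  (((List.range (cp_tree.length + 1)).any fun n => (List.lookup (pvUpN cp_tree n a) cp_tree).isNone) &&
   ((List.range (cp_tree.length + 1)).any fun m =>
     (List.range (cp_tree.length + 1)).any fun i =>
       pvUpN cp_tree m b == pvUpN cp_tree i a)) = true

instance (cp_tree : List (String × String × String)) (a : String) (b : String) : Decidable (Pre_lca_treeedges_cp_tree cp_tree a b) := by unfold Pre_lca_treeedges_cp_tree; infer_instance

def pvWitness_lca_treeedges_cp_tree : (List (String × String × String)) × String × String :=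
  ([("a", "r", "e1"), ("b", "r", "e2")], "a", "b")

def Spec_lca_treeedges_cp_tree (cp_tree : List (String × String × String)) (a : String) (b : String) (out : List String) : Prop := out = lca_treeedges_cp_tree_alt cp_tree a b
instance (cp_tree : List (String × String × String)) (a : String) (b : String) (out : List String) : Decidable (Spec_lca_treeedges_cp_tree cp_tree a b out) := by unfold Spec_lca_treeedges_cp_tree; infer_instance

-- ===== CLAIM (what is proved, stated in full; the proofs are below) =====
def Claim_equal_lca_treeedges_cp_tree : Prop := ∀ (cp_tree : List (String × String × String)) (a : String) (b : String), Dom_lca_treeedges_cp_tree cp_tree a b → Pre_lca_treeedges_cp_tree cp_tree a b → Spec_lca_treeedges_cp_tree cp_tree a b (lca_treeedges_cp_tree cp_tree a b)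

-- ===== LEMMAS AND PROOFS =====

theorem pvLookup_eq_lookup (t : List (String × String × String)) (x : String) :
    pvLookup t x = List.lookup x t := by
  induction t with
  | nil => rfl
  | cons h r ih =>
    obtain ⟨k, v⟩ := h
    simp only [pvLookup, List.lookup, ih, beq_iff_eq]
    rcases eq_or_ne k x with he | hne
    · subst he; simp
    · rw [if_neg hne]
      have hb : (x == k) = false := by simpa using Ne.symm hne
      rw [hb]

theorem pvUpN_succ_right (t : List (String × String × String)) (k : Nat) (x : String) :
    pvUpN t (k + 1) x = pvUp t (pvUpN t k x) := by
  induction k generalizing x with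
  | zero => rfl
  | succ k ih => simpa [pvUpN] using ih (pvUp t x)

theorem pvUpN_add (t : List (String × String × String)) (j k : Nat) (x : String) :
    pvUpN t (j + k) x = pvUpN t k (pvUpN t j x) := by
  induction j generalizing x with
  | zero => simp [pvUpN]
  | succ j ih => simpa [pvUpN, Nat.succ_add] using ih (pvUp t x)

-- once the chain leaves the key set it is stuck
theorem pvUpN_stab (t : List (String × String × String)) (x : String) (j : Nat)
    (h : pvLookup t (pvUpN t j x) = none) :
    ∀ k, j ≤ k → pvUpN t k x = pvUpN t j x := by
  intro k hk
  obtain ⟨d, rfl⟩ := Nat.exists_eq_add_of_le hk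
  induction d with
  | zero => rfl
  | succ d ih =>
    have : j + (d + 1) = (j + d) + 1 := by omega
    rw [this, pvUpN_succ_right, ih (by omega), pvUp, ← pvLookup_eq_lookup, h]

-- a terminating chain never repeats a node
theorem chain_nodup (t : List (String × String × String)) (x : String) (nn : Nat)
    (hmin : ∀ j, j < nn → (pvLookup t (pvUpN t j x)).isSome)
    (hroot : pvLookup t (pvUpN t nn x) = none) :
    ∀ j k, j < k → k ≤ nn → pvUpN t j x ≠ pvUpN t k x := by
  intro j k hjk hk heq
  have h2 : pvUpN t (j + (nn - k)) x = pvUpN t nn x := by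
    rw [pvUpN_add, heq, ← pvUpN_add, show k + (nn - k) = nn from by omega]
  have h3 := hmin (j + (nn - k)) (by omega)
  rw [h2, hroot] at h3
  simp at h3

theorem lookup_mem_fst (t : List (String × String × String)) (x : String)
    (h : (pvLookup t x).isSome) : x ∈ t.map Prod.fst := by
  induction t with
  | nil => simp [pvLookup] at h
  | cons hd r ih =>
    obtain ⟨k, v⟩ := hd
    by_cases hk : k == x
    · simp [beq_iff_eq.mp hk]
    · rw [pvLookup, if_neg (by simp_all)] at h
      simpa using Or.inr (by simpa using ih h)

-- a terminating chain's length is bounded by the number of keys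
theorem chain_le_length (t : List (String × String × String)) (x : String) (nn : Nat)
    (hmin : ∀ j, j < nn → (pvLookup t (pvUpN t j x)).isSome)
    (hroot : pvLookup t (pvUpN t nn x) = none) :
    nn ≤ t.length := by
  have hnd : ((List.range nn).map (fun j => pvUpN t j x)).Nodup := by
    rw [List.nodup_iff_getElem?_ne_getElem?]
    intro j k hjk hk
    simp only [List.length_map, List.length_range] at hk
    rw [List.getElem?_map, List.getElem?_map, List.getElem?_range (by omega),
        List.getElem?_range hk]
    simpa using chain_nodup t x nn hmin hroot j k hjk (by omega)
  have hsub : ((List.range nn).map (fun j => pvUpN t j x)) ⊆ t.map Prod.fst := by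
    intro y hy
    simp only [List.mem_map, List.mem_range] at hy
    obtain ⟨j, hj, rfl⟩ := hy
    exact lookup_mem_fst t _ (hmin j hj)
  have := (List.subperm_of_subset hnd hsub).length_le
  simpa using this

-- the tree edge out of a node (junk "" off the key set; only used at keys)
def pvEdge (t : List (String × String × String)) (x : String) : String :=
  match pvLookup t x with
  | some v => v.2
  | none => ""

theorem pvUp_eq (t : List (String × String × String)) (x p e : String)
    (h : pvLookup t x = some (p, e)) : pvUp t x = p := by
  rw [pvUp, ← pvLookup_eq_lookup, h]

theorem pvEdge_eq (t : List (String × String × String)) (x p e : String)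
    (h : pvLookup t x = some (p, e)) : pvEdge t x = e := by
  rw [pvEdge, h]

-- the trace built by trace_to_root does not touch keys off x's chain
theorem trace_get_notmem (t : List (String × String × String)) :
    ∀ (f : Nat) (x : String) (tr : PySem.Dict String (Option String × Option String)) (y : String),
      (∀ j, j ≤ f → pvUpN t j x ≠ y) →
      (pvTraceLoop t f x tr).get? y = tr.get? y := by
  intro f
  induction f with
  | zero =>
    intro x tr y h
    exact PySem.Dict.get?_insert_of_ne _ _ (Ne.symm (h 0 (by omega)))
  | succ f ih =>
    intro x tr y h
    rw [pvTraceLoop]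
    cases hl : pvLookup t x with
    | none => exact PySem.Dict.get?_insert_of_ne _ _ (Ne.symm (h 0 (by omega)))
    | some v =>
      obtain ⟨p, e⟩ := v
      have hxy : x ≠ y := h 0 (by omega)
      have h' : ∀ j, j ≤ f → pvUpN t j p ≠ y := by
        intro j hj
        have : pvUpN t j p = pvUpN t (j + 1) x := by
          simp [pvUpN, pvUp_eq t x p e hl]
        rw [this]
        exact h (j + 1) (by omega)
      rw [ih p _ y h']
      exact PySem.Dict.get?_insert_of_ne _ _ (Ne.symm hxy)

-- trace_to_root's entries along x's chain
theorem trace_get_mem (t : List (String × String × String)) :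
    ∀ (nn : Nat) (f : Nat) (x : String) (tr : PySem.Dict String (Option String × Option String)) (j : Nat),
      (∀ j', j' < nn → (pvLookup t (pvUpN t j' x)).isSome) →
      pvLookup t (pvUpN t nn x) = none →
      (∀ j' k, j' < k → k ≤ nn → pvUpN t j' x ≠ pvUpN t k x) →
      nn ≤ f → j ≤ nn →
      (pvTraceLoop t f x tr).get? (pvUpN t j x) =
        some (if j = nn then (none, none)
              else (some (pvUpN t (j + 1) x), some (pvEdge t (pvUpN t j x)))) := by
  intro nn
  induction nn with
  | zero =>
    intro f x tr j _ hroot _ _ hj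
    interval_cases j
    have hx : pvLookup t x = none := hroot
    cases f with
    | zero => simp [pvTraceLoop, pvUpN, PySem.Dict.get?_insert_self]
    | succ f => simp [pvTraceLoop, pvUpN, hx, PySem.Dict.get?_insert_self]
  | succ nn ih =>
    intro f x tr j hmin hroot hnd hf hj
    have hs : (pvLookup t x).isSome := hmin 0 (by omega)
    obtain ⟨⟨p, e⟩, hl⟩ := Option.isSome_iff_exists.mp hs
    cases f with
    | zero => omega
    | succ f =>
      have hshift : ∀ k, pvUpN t k p = pvUpN t (k + 1) x := by
        intro k; simp [pvUpN, pvUp_eq t x p e hl]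
      rw [pvTraceLoop, hl]
      cases j with
      | zero =>
        have hne : ∀ j', j' ≤ f → pvUpN t j' p ≠ x := by
          intro j' _
          rw [hshift j']
          by_cases hc : j' + 1 ≤ nn + 1
          · exact fun hc2 => hnd 0 (j' + 1) (by omega) hc (hc2.symm)
          · have : pvUpN t (j' + 1) x = pvUpN t (nn + 1) x :=
              pvUpN_stab t x (nn + 1) hroot (j' + 1) (by omega)
            rw [this]
            exact fun hc2 => hnd 0 (nn + 1) (by omega) (by omega) (hc2.symm)
        rw [show pvUpN t 0 x = x from rfl, trace_get_notmem t f p _ x hne,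
            PySem.Dict.get?_insert_self]
        simp [pvUpN, pvUp_eq t x p e hl, pvEdge_eq t x p e hl]
      | succ j =>
        have hres := ih f p (tr.insert x (some p, some e)) j
          (by intro k hk; rw [hshift k]; exact hmin (k + 1) (by omega))
          (by rw [hshift nn]; exact hroot)
          (by intro k l hkl hl'; rw [hshift k, hshift l]
              exact hnd (k + 1) (l + 1) (by omega) (by omega))
          (by omega) (by omega)
        rw [← hshift j] at *
        rw [hres]
        rcases eq_or_ne j nn with h | h
        · simp [h]
        · simp only [if_neg h, if_neg (by omega : ¬ j + 1 = nn + 1)]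
          rw [hshift (j + 1)]

-- key set of the trace = the nodes of x's chain (plus whatever tr already holds)
theorem trace_contains (t : List (String × String × String)) :
    ∀ (nn : Nat) (f : Nat) (x : String) (tr : PySem.Dict String (Option String × Option String)),
      (∀ j', j' < nn → (pvLookup t (pvUpN t j' x)).isSome) →
      pvLookup t (pvUpN t nn x) = none →
      nn ≤ f →
      ∀ y, ((pvTraceLoop t f x tr).contains y = true ↔
            tr.contains y = true ∨ ∃ j, j ≤ nn ∧ pvUpN t j x = y) := by
  intro nn
  induction nn with
  | zero =>
    intro f x tr _ hroot _ y
    have hx : pvLookup t x = none := hroot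
    have : (pvTraceLoop t f x tr) = tr.insert x (none, none) := by
      cases f with
      | zero => rfl
      | succ f => rw [pvTraceLoop, hx]
    rw [this, PySem.Dict.contains_insert]
    constructor
    · intro h
      rcases Bool.or_eq_true_iff.mp h with h | h
      · exact Or.inr ⟨0, by omega, (beq_iff_eq.mp h).symm⟩
      · exact Or.inl h
    · rintro (h | ⟨j, hj, hm⟩)
      · simp [h]
      · interval_cases j
        have hyx : y = x := hm.symm
        simp [hyx]
  | succ nn ih =>
    intro f x tr hmin hroot hf y
    have hs : (pvLookup t x).isSome := hmin 0 (by omega)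
    obtain ⟨⟨p, e⟩, hl⟩ := Option.isSome_iff_exists.mp hs
    cases f with
    | zero => omega
    | succ f =>
      have hshift : ∀ k, pvUpN t k p = pvUpN t (k + 1) x := by
        intro k; simp [pvUpN, pvUp_eq t x p e hl]
      rw [pvTraceLoop, hl]
      rw [ih f p _
        (by intro k hk; rw [hshift k]; exact hmin (k + 1) (by omega))
        (by rw [hshift nn]; exact hroot) (by omega) y]
      rw [PySem.Dict.contains_insert]
      constructor
      · rintro (h | ⟨j, hj, hm⟩)
        · rcases Bool.or_eq_true_iff.mp h with h | h
          · exact Or.inr ⟨0, by omega, (beq_iff_eq.mp h).symm⟩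
          · exact Or.inl h
        · exact Or.inr ⟨j + 1, by omega, by rw [← hshift j]; exact hm⟩
      · rintro (h | ⟨j, hj, hm⟩)
        · exact Or.inl (by simp [h])
        · cases j with
          | zero =>
            have hyx : y = x := hm.symm
            exact Or.inl (by simp [hyx])
          | succ j => exact Or.inr ⟨j, by omega, by rw [hshift j]; exact hm⟩

-- the path built by B's _path_to_root, in closed form
theorem pathUp_eq (t : List (String × String × String)) :
    ∀ (nn : Nat) (f : Nat) (x : String),
      (∀ j, j < nn → (pvLookup t (pvUpN t j x)).isSome) →
      pvLookup t (pvUpN t nn x) = none →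
      nn ≤ f →
      pvPathUp t f x = ((List.range (nn + 1)).map (fun j => pvUpN t j x),
                        (List.range nn).map (fun j => pvEdge t (pvUpN t j x))) := by
  intro nn
  induction nn with
  | zero =>
    intro f x _ hroot _
    have hx : pvLookup t x = none := hroot
    cases f with
    | zero => simp [pvPathUp, pvUpN, List.range_succ]
    | succ f => simp [pvPathUp, hx, pvUpN, List.range_succ]
  | succ nn ih =>
    intro f x hmin hroot hf
    have hs : (pvLookup t x).isSome := hmin 0 (by omega)
    obtain ⟨⟨p, e⟩, hl⟩ := Option.isSome_iff_exists.mp hs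
    cases f with
    | zero => omega
    | succ f =>
      have hshift : ∀ k, pvUpN t k p = pvUpN t (k + 1) x := by
        intro k; simp [pvUpN, pvUp_eq t x p e hl]
      simp only [pvPathUp, hl]
      rw [ih f p
        (by intro k hk; rw [hshift k]; exact hmin (k + 1) (by omega))
        (by rw [hshift nn]; exact hroot) (by omega)]
      have hmapN : (fun j => pvUpN t j p) = (fun j => pvUpN t (Nat.succ j) x) :=
        funext fun j => hshift j
      have hmapE : (fun j => pvEdge t (pvUpN t j p)) = (fun j => pvEdge t (pvUpN t (Nat.succ j) x)) :=
        funext fun j => by rw [hshift j]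
      simp only [hmapN, hmapE]
      refine Prod.ext ?_ ?_
      · simp [List.range_succ_eq_map, List.map_map, Function.comp, pvUpN]
      · simp [List.range_succ_eq_map (n := nn), List.map_map, Function.comp,
              pvEdge_eq t x p e hl, show pvUpN t 0 x = x from rfl]

-- one edge peeled off a range-map of edges
theorem seg_cons (t : List (String × String × String)) (x : String) (j s : Nat) :
    (List.range (s + 1)).map (fun d => pvEdge t (pvUpN t (j + d) x)) =
      pvEdge t (pvUpN t j x) ::
        (List.range s).map (fun d => pvEdge t (pvUpN t (j + 1 + d) x)) := by
  rw [List.range_succ_eq_map, List.map_cons, List.map_map]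
  refine congrArg₂ _ (by simp) ?_
  refine List.map_congr_left ?_
  intro d _
  simp only [Function.comp]
  rw [show j + 1 + d = j + (d + 1) from by omega]

-- A's second loop follows trace_a from a down to the LCA
theorem walkA_eq (t : List (String × String × String))
    (tr : PySem.Dict String (Option String × Option String)) (x : String) (nn i : Nat)
    (hget : ∀ j, j < nn → tr.get? (pvUpN t j x) =
      some (some (pvUpN t (j + 1) x), some (pvEdge t (pvUpN t j x))))
    (hnd : ∀ j k, j < k → k ≤ nn → pvUpN t j x ≠ pvUpN t k x)
    (hi : i ≤ nn) :
    ∀ (f j : Nat) (acc : List String), j ≤ i → i - j < f →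
      pvWalkA tr f (pvUpN t j x) (pvUpN t i x) acc =
        acc ++ (List.range (i - j)).map (fun d => pvEdge t (pvUpN t (j + d) x)) := by
  intro f
  induction f with
  | zero => intro j acc _ h; omega
  | succ f ih =>
    intro j acc hj hf
    rw [pvWalkA]
    rcases eq_or_ne j i with h | h
    · subst h
      simp
    · have hlt : j < i := by omega
      have hne : pvUpN t j x ≠ pvUpN t i x := hnd j i hlt hi
      rw [if_neg (by simpa using hne)]
      split
      next nxt e heq =>
        rw [hget j (by omega)] at heq
        obtain ⟨rfl, rfl⟩ : nxt = pvUpN t (j + 1) x ∧ e = pvEdge t (pvUpN t j x) := by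
          simpa [eq_comm] using heq
        rw [ih (j + 1) (acc ++ [pvEdge t (pvUpN t j x)]) (by omega) (by omega)]
        rw [show i - j = (i - (j + 1)) + 1 by omega, seg_cons]
        simp
      next heq =>
        exact ((heq _ _ (hget j (by omega))).elim : _)

-- A's first loop climbs from b to the first node inside trace_a
theorem walkB_eq (t : List (String × String × String))
    (tr : PySem.Dict String (Option String × Option String)) (b : String) (m : Nat)
    (hstop : tr.contains (pvUpN t m b) = true)
    (hgo : ∀ j, j < m → tr.contains (pvUpN t j b) = false)
    (hkey : ∀ j, j < m → (pvLookup t (pvUpN t j b)).isSome) :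
    ∀ (f j : Nat) (acc : List String), j ≤ m → m - j < f →
      pvWalkB t tr f (pvUpN t j b) acc =
        (pvUpN t m b, acc ++ (List.range (m - j)).map (fun d => pvEdge t (pvUpN t (j + d) b))) := by
  intro f
  induction f with
  | zero => intro j acc _ h; omega
  | succ f ih =>
    intro j acc hj hf
    rw [pvWalkB]
    rcases eq_or_ne j m with h | h
    · subst h
      rw [if_pos hstop]
      simp
    · have hlt : j < m := by omega
      rw [if_neg (by simp [hgo j hlt])]
      split
      next nxt e heq =>
        have hp : nxt = pvUpN t (j + 1) b := by
          rw [pvUpN_succ_right, pvUp_eq t _ nxt e heq]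
        have he : e = pvEdge t (pvUpN t j b) := (pvEdge_eq t _ nxt e heq).symm
        rw [hp, he, ih (j + 1) _ (by omega) (by omega)]
        rw [show m - j = (m - (j + 1)) + 1 by omega, seg_cons]
        simp
      next heq =>
        have := hkey j hlt
        rw [heq] at this
        simp at this

-- no match at the first position ⇒ the zip-and-break loop stops at once
theorem matchLen_rev_zero (f g : Nat → String) (p q : Nat)
    (h : ∀ pp qq, p = pp + 1 → q = qq + 1 → f pp ≠ g qq) :
    pvMatchLen ((((List.range p).map f).reverse).zip (((List.range q).map g).reverse)) = 0 := by
  cases p with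
  | zero => simp [pvMatchLen]
  | succ pp =>
    cases q with
    | zero => simp [pvMatchLen, List.zip_nil_right]
    | succ qq =>
      rw [List.range_succ, List.range_succ, List.map_append, List.map_append,
          List.reverse_append, List.reverse_append]
      simp only [List.map_cons, List.map_nil, List.reverse_cons, List.reverse_nil,
        List.nil_append, List.cons_append, List.zip_cons_cons]
      simp [pvMatchLen, h pp qq rfl rfl]

-- matching a list against itself consumes it whole
theorem matchLen_self_append (l : List String) (r : List (String × String)) :
    pvMatchLen (l.zip l ++ r) = l.length + pvMatchLen r := by
  induction l with
  | nil => simp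
  | cons h tl ih => simp [pvMatchLen, ih]; omega

theorem pvUpN_zero (t : List (String × String × String)) (x : String) :
    pvUpN t 0 x = x := rfl

theorem lca_treeedges_cp_tree_spec : Claim_equal_lca_treeedges_cp_tree := by
  intro t a b _ hpre
  unfold Spec_lca_treeedges_cp_tree
  unfold Pre_lca_treeedges_cp_tree at hpre
  rw [Bool.and_eq_true] at hpre
  obtain ⟨h1b, h2b⟩ := hpre
  simp only [List.any_eq_true, List.mem_range, Option.isNone_iff_eq_none, beq_iff_eq] at h1b h2b
  obtain ⟨n₀, hn₀L, hn₀⟩ := h1b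
  rw [← pvLookup_eq_lookup] at hn₀
  obtain ⟨m₀, hm₀L, i₀, hi₀L, hmb₀⟩ := h2b
  -- n: length of a's chain to its root
  have h₁ : ∃ n, pvLookup t (pvUpN t n a) = none := ⟨n₀, hn₀⟩
  set n := Nat.find h₁ with hn_def
  have hroot : pvLookup t (pvUpN t n a) = none := Nat.find_spec h₁
  have hminA : ∀ j, j < n → (pvLookup t (pvUpN t j a)).isSome := by
    intro j hj
    exact Option.ne_none_iff_isSome.mp (Nat.find_min h₁ hj)
  have hnL : n ≤ t.length := chain_le_length t a n hminA hroot
  have hstabA : ∀ k, n ≤ k → pvUpN t k a = pvUpN t n a := pvUpN_stab t a n hroot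
  have hnd : ∀ j k, j < k → k ≤ n → pvUpN t j a ≠ pvUpN t k a :=
    chain_nodup t a n hminA hroot
  -- m: length of b's chain to the first node on a's chain
  have hPm₀ : ((List.range (n + 1)).any fun j => pvUpN t j a == pvUpN t m₀ b) = true := by
    simp only [List.any_eq_true, List.mem_range, beq_iff_eq]
    by_cases h : i₀ ≤ n
    · exact ⟨i₀, by omega, hmb₀.symm⟩
    · exact ⟨n, by omega, by rw [← hstabA i₀ (by omega)]; exact hmb₀.symm⟩
  have h₂ : ∃ m, ((List.range (n + 1)).any fun j => pvUpN t j a == pvUpN t m b) = true := ⟨m₀, hPm₀⟩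
  set m := Nat.find h₂ with hm_def
  have hmspec := Nat.find_spec h₂
  rw [← hm_def] at hmspec
  simp only [List.any_eq_true, List.mem_range, beq_iff_eq] at hmspec
  obtain ⟨iw, hiwn, hiw⟩ := hmspec
  have hm_min : ∀ j, j < m → ¬ ∃ iq, iq ≤ n ∧ pvUpN t iq a = pvUpN t j b := by
    rintro j hj ⟨iq, hiq, he⟩
    exact Nat.find_min h₂ hj
      (by simp only [List.any_eq_true, List.mem_range, beq_iff_eq]; exact ⟨iq, by omega, he⟩)
  have hkeyB : ∀ j, j < m → (pvLookup t (pvUpN t j b)).isSome := by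
    intro j hj
    by_contra h
    have hnone : pvLookup t (pvUpN t j b) = none := by
      cases hc : pvLookup t (pvUpN t j b)
      · rfl
      · rw [hc] at h; simp at h
    have hst := pvUpN_stab t b j hnone m (by omega)
    exact hm_min j hj ⟨iw, by omega, by rw [hiw, hst]⟩
  -- i: index of the LCA on a's chain
  have hq : ∃ iq, pvUpN t iq a = pvUpN t m b := ⟨iw, hiw⟩
  set i := Nat.find hq with hi_def
  have hi_eq : pvUpN t i a = pvUpN t m b := Nat.find_spec hq
  have hi_min : ∀ j, j < i → pvUpN t j a ≠ pvUpN t m b := fun j hj => Nat.find_min hq hj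
  have hiN : i ≤ n := by
    have h1 : i ≤ iw := Nat.find_min' hq hiw
    omega
  -- b's chain continues along a's chain after the meet
  have hb_shift : ∀ d, pvUpN t (m + d) b = pvUpN t (i + d) a := by
    intro d
    rw [pvUpN_add, ← hi_eq, ← pvUpN_add]
  -- nb: length of b's full chain to the root
  have hrootB : pvLookup t (pvUpN t (m + (n - i)) b) = none := by
    rw [hb_shift, show i + (n - i) = n from by omega]
    exact hroot
  have hminB : ∀ j, j < m + (n - i) → (pvLookup t (pvUpN t j b)).isSome := by
    intro j hj
    by_cases hc : j < m
    · exact hkeyB j hc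
    · have : j = m + (j - m) := by omega
      rw [this, hb_shift]
      exact hminA _ (by omega)
  have hnbL : m + (n - i) ≤ t.length := chain_le_length t b _ hminB hrootB
  -- trace facts
  have tget : ∀ j, j < n →
      (pvTraceLoop t (t.length + 1) a PySem.Dict.empty).get? (pvUpN t j a) =
        some (some (pvUpN t (j + 1) a), some (pvEdge t (pvUpN t j a))) := by
    intro j hj
    have := trace_get_mem t n (t.length + 1) a PySem.Dict.empty j hminA hroot hnd (by omega) (by omega)
    rwa [if_neg (by omega)] at this
  have tcont : ∀ y, ((pvTraceLoop t (t.length + 1) a PySem.Dict.empty).contains y = true ↔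
      ∃ j, j ≤ n ∧ pvUpN t j a = y) := by
    intro y
    rw [trace_contains t n (t.length + 1) a PySem.Dict.empty hminA hroot (by omega) y]
    simp [PySem.Dict.contains_empty]
  have tgo : ∀ j, j < m →
      (pvTraceLoop t (t.length + 1) a PySem.Dict.empty).contains (pvUpN t j b) = false := by
    intro j hj
    by_contra hcc
    have h := Bool.ne_false_iff.mp hcc
    obtain ⟨jj, hjj, hje⟩ := (tcont _).mp h
    exact hm_min j hj ⟨jj, hjj, hje⟩
  -- evaluate A
  have hwb := walkB_eq t (pvTraceLoop t (t.length + 1) a PySem.Dict.empty) b m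
    (by rw [tcont]; exact ⟨i, hiN, hi_eq⟩) tgo hkeyB (t.length + 1) 0 [] (by omega) (by omega)
  have hwa := walkA_eq t (pvTraceLoop t (t.length + 1) a PySem.Dict.empty) a n i tget hnd hiN
    (t.length + 1) 0 ((List.range m).map fun d => pvEdge t (pvUpN t d b)) (by omega) (by omega)
  simp only [pvUpN_zero, Nat.zero_add, Nat.sub_zero, List.nil_append] at hwb hwa
  -- evaluate B: both full paths in closed form
  have hpa := pathUp_eq t n (t.length + 1) a hminA hroot (by omega)
  have hpb := pathUp_eq t (m + (n - i)) (t.length + 1) b hminB hrootB (by omega)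
  -- split both node lists at the shared tail
  have hsplitA : (List.range (n + 1)).map (fun j => pvUpN t j a) =
      (List.range i).map (fun j => pvUpN t j a) ++
      (List.range (n - i + 1)).map (fun d => pvUpN t (i + d) a) := by
    rw [show n + 1 = i + (n - i + 1) from by omega, List.range_add, List.map_append,
        List.map_map]
    simp [Function.comp]
  have hsplitB : (List.range (m + (n - i) + 1)).map (fun j => pvUpN t j b) =
      (List.range m).map (fun j => pvUpN t j b) ++
      (List.range (n - i + 1)).map (fun d => pvUpN t (i + d) a) := by
    rw [show m + (n - i) + 1 = m + (n - i + 1) from by omega, List.range_add, List.map_append,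
        List.map_map]
    refine congrArg _ ?_
    refine List.map_congr_left ?_
    intro d _
    simpa [Function.comp] using hb_shift d
  -- the matched suffix has length n - i + 1
  have hmatch : pvMatchLen
      (List.zip (((List.range (n + 1)).map (fun j => pvUpN t j a)).reverse)
                (((List.range (m + (n - i) + 1)).map (fun j => pvUpN t j b)).reverse)) =
      n - i + 1 := by
    rw [hsplitA, hsplitB, List.reverse_append, List.reverse_append]
    set S := ((List.range (n - i + 1)).map (fun d => pvUpN t (i + d) a)).reverse with hS
    have hzip : List.zip (S ++ ((List.range i).map (fun j => pvUpN t j a)).reverse)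
        (S ++ ((List.range m).map (fun j => pvUpN t j b)).reverse) =
        S.zip S ++ (((List.range i).map (fun j => pvUpN t j a)).reverse).zip
          (((List.range m).map (fun j => pvUpN t j b)).reverse) := by
      exact List.zip_append rfl
    rw [hzip, matchLen_self_append]
    have hSlen : S.length = n - i + 1 := by simp [hS]
    have htail : pvMatchLen ((((List.range i).map (fun j => pvUpN t j a)).reverse).zip
        (((List.range m).map (fun j => pvUpN t j b)).reverse)) = 0 := by
      refine matchLen_rev_zero _ _ i m ?_
      intro pp qq hp hq' hc
      exact hm_min qq (by omega) ⟨pp, by omega, hc⟩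
    rw [htail, hSlen]
  -- the roots agree, so B takes its main branch
  have hlastA : (((List.range (n + 1)).map (fun j => pvUpN t j a)).getLast?) =
      some (pvUpN t n a) := by
    rw [List.range_succ, List.map_append]
    simp
  have hlastB : (((List.range (m + (n - i) + 1)).map (fun j => pvUpN t j b)).getLast?) =
      some (pvUpN t n a) := by
    rw [List.range_succ, List.map_append]
    simp [hb_shift, show i + (n - i) = n from by omega]
  -- put the two sides together
  simp only [lca_treeedges_cp_tree, lca_treeedges_cp_tree_alt]
  rw [hwb]
  dsimp only
  rw [← hi_eq, hwa, hpa, hpb]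
  dsimp only
  rw [if_pos (by rw [hlastA, hlastB]), hmatch]
  simp only [List.length_map, List.length_range]
  rw [show m + (n - i) + 1 - (n - i + 1) = m from by omega,
      show n + 1 - (n - i + 1) = i from by omega]
  rw [← List.map_take, List.take_range, min_eq_left (by omega : m ≤ m + (n - i)),
      ← List.map_take, List.take_range, min_eq_left hiN]
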